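-- pv_equiv track=rewrite | github.com/DongilMin/Programmers | 프로그래머스/1/389478. 택배 상자 꺼내기/택배 상자 꺼내기.py | solut
-- ===== SOURCE A (Python) =====
-- def solut(n, w, num):
--     answer = 0
--     direction = 1
--     boxes = [[] for _ in range(w)]
--     number = 1
--     while number <= n :
--         if direction == 1 :
--             for col in range(0, w, 1):
--                 boxes[col].append(number)
--                 number += 1
--                 if number > n: break
--         else:
--             for col in range(w - 1, -1, -1):
--                 boxes[col].append(number)
--                 number += 1
--                 if number > n: break
--         direction *= -1
--
--     for box in boxes:
--         if num in box:
--             return len(box) - box.index(num)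
--     return 0
-- ===== SOURCE B (Python) =====
-- def solut(n, w, num):
--     # O(1) closed form: locate num's column in the snake fill and the
--     # height of that column's stack, instead of simulating the fill.
--     if w <= 0 or num < 1 or num > n:
--         return 0
--     q, rem = divmod(num - 1, w)          # q = row of num, rem = offset in row
--     c = rem if q % 2 == 0 else w - 1 - rem
--     full, extra = divmod(n, w)           # full rows, boxes in the partial row
--     if extra:
--         covered = (c < extra) if full % 2 == 0 else (c >= w - extra)
--         height = full + (1 if covered else 0)
--     else:
--         height = full
--     return height - q
-- ===== Notes on version B (the rewrite author's own statement) =====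
-- stated objective: faster
-- what changed: A simulates the whole snake fill box by box into w stacks and then scans them; B computes num's row and column and the height of that column's stack directly with divmod arithmetic, no simulation.
import Mathlib
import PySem

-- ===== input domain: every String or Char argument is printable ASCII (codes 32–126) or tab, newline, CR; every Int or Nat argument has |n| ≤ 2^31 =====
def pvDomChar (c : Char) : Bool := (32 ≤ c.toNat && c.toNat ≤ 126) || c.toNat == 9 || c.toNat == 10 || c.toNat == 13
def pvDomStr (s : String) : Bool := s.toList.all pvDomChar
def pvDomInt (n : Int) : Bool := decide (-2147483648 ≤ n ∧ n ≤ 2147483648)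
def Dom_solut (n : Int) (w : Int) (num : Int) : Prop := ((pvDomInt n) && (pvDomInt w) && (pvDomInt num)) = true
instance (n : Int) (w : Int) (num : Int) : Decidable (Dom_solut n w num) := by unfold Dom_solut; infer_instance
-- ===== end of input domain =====

-- B replaces A's O(n) simulation of the snake fill by O(1) closed-form arithmetic
-- (column of num and the height of its stack); equivalence proved on Pre_ (A loops forever when w ≤ 0 < n).

-- ===== PORT A =====
-- inner for-loop: iterate the column list, append `number` to boxes[col], break once number > n.
-- `col` ranges over range(0,w) resp. range(w-1,-1,-1), so 0 ≤ col < len(boxes): `.toNat` is exact here.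
def solutInner (n : Int) (cols : List Int) (boxes : List (List Int)) (number : Int) :
    List (List Int) × Int :=
  match cols with
  | [] => (boxes, number)
  | c :: rest =>
    let boxes' := boxes.modify c.toNat (fun b => b ++ [number])
    if number + 1 > n then (boxes', number + 1)
    else solutInner n rest boxes' (number + 1)

-- while-loop; the fuel only guards totality (on Pre_, w ≥ 1, each pass raises `number` by ≥ 1,
-- so fuel n.toNat+1 is never exhausted); the loop body is A's, branch for branch.
def solutOuter (n : Int) (w : Int) : Nat → Int → List (List Int) → Int → List (List Int)
  | 0, _, boxes, _ => boxes
  | fuel+1, direction, boxes, number =>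
    if number ≤ n then
      let cols := if direction = 1 then PySem.List.pyRange 0 w 1
                  else PySem.List.pyRange (w-1) (-1) (-1)
      let p := solutInner n cols boxes number
      solutOuter n w fuel (direction * -1) p.1 p.2
    else boxes

-- final scan: first box containing num → len(box) - box.index(num), else 0
def solutScan (num : Int) : List (List Int) → Int
  | [] => 0
  | box :: rest =>
    if box.contains num then (box.length : Int) - (((PySem.List.index? box num).getD 0 : Nat) : Int)
    else solutScan num rest

def solut (n : Int) (w : Int) (num : Int) : Int :=
  solutScan num (solutOuter n w (n.toNat + 1) 1 (List.replicate w.toNat []) 1)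

-- ===== PORT B =====
def solut_alt (n : Int) (w : Int) (num : Int) : Int :=
  if w ≤ 0 ∨ num < 1 ∨ num > n then 0
  else
    let q := PySem.Int.floordiv (num - 1) w
    let rem := PySem.Int.mod (num - 1) w
    let c := if PySem.Int.mod q 2 = 0 then rem else w - 1 - rem
    let full := PySem.Int.floordiv n w
    let extra := PySem.Int.mod n w
    let height := if extra ≠ 0 then
        (if (if PySem.Int.mod full 2 = 0 then decide (c < extra) else decide (w - extra ≤ c)) = true
         then full + 1 else full)
      else full
    height - q

-- ===== PRECONDITION & SPEC =====
-- Pre_ excludes exactly w ≤ 0 with n ≥ 1: there A's while loop never advances `number` and diverges.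
def Pre_solut (n : Int) (w : Int) (num : Int) : Prop := 1 ≤ w ∨ n ≤ 0
instance (n : Int) (w : Int) (num : Int) : Decidable (Pre_solut n w num) := by
  unfold Pre_solut; infer_instance
def pvWitness_solut : Int × Int × Int := (7, 3, 5)

def Spec_solut (n : Int) (w : Int) (num : Int) (out : Int) : Prop := out = solut_alt n w num
instance (n : Int) (w : Int) (num : Int) (out : Int) : Decidable (Spec_solut n w num out) := by
  unfold Spec_solut; infer_instance

-- ===== CLAIM (what is proved, stated in full; the proofs are below) =====
def Claim_equal_solut : Prop := ∀ (n : Int) (w : Int) (num : Int),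
  Dom_solut n w num → Pre_solut n w num → Spec_solut n w num (solut n w num)

-- ===== LEMMAS AND PROOFS =====

-- value stored at row r (0-based), column c of the snake fill
def valAt (w : Int) (r : Nat) (c : Int) : Int :=
  if r % 2 = 0 then (r : Int) * w + c + 1 else ((r : Int) + 1) * w - c

-- height of column c's stack, as an Int
def colLenI (n w c : Int) : Int :=
  if n % w ≠ 0 ∧ (if (n / w) % 2 = 0 then c < n % w else w - n % w ≤ c) then n / w + 1 else n / w

def colLen (n w c : Int) : Nat := (colLenI n w c).toNat

-- contents of column c from row k on
def colFrom (n w : Int) (k : Nat) (c : Int) : List Int :=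
  (List.range (colLen n w c - k)).map (fun i => valAt w (k + i) c)

lemma valAt_bounds (w : Int) (r : Nat) (c : Int) (hc0 : 0 ≤ c) (hcw : c < w) :
    (r : Int) * w + 1 ≤ valAt w r c ∧ valAt w r c ≤ ((r : Int) + 1) * w := by
  unfold valAt; split_ifs <;> constructor <;> nlinarith

lemma valAt_le_iff (n w c : Int) (r : Nat) (hw : 1 ≤ w) (hn : 1 ≤ n)
    (hc0 : 0 ≤ c) (hcw : c < w) :
    valAt w r c ≤ n ↔ (r : Int) < colLenI n w c := by
  have hw0 : 0 < w := by omega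
  have hdiv : w * (n / w) + n % w = n := Int.ediv_add_emod n w
  have hE0 : 0 ≤ n % w := Int.emod_nonneg n (by omega)
  have hEw : n % w < w := Int.emod_lt_of_pos n hw0
  have hpar : ((r % 2 : Nat) : Int) = (r : Int) % 2 := by rw [Int.natCast_mod]; rfl
  unfold valAt colLenI
  generalize hF : n / w = F at hdiv ⊢
  generalize hE : n % w = E at hdiv hE0 hEw ⊢
  have hcm : F * w = w * F := mul_comm F w
  have hexp : ((r : Int) + 1) * w = (r : Int) * w + w := by ring
  rcases lt_trichotomy ((r : Int)) F with hlt | heq | hgt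
  · have h1 : ((r : Int) + 1) * w ≤ F * w :=
      mul_le_mul_of_nonneg_right (by linarith) (by linarith)
    constructor
    · intro _; split_ifs <;> linarith
    · intro _; split_ifs <;> linarith
  · have hrw : (r : Int) * w = w * F := by rw [heq, mul_comm]
    rcases Nat.mod_two_eq_zero_or_one r with hr2 | hr2
    · have hF2 : F % 2 = 0 := by rw [hr2] at hpar; rw [heq] at hpar; simpa using hpar.symm
      simp only [hr2, hF2, reduceIte, if_pos]
      constructor
      · intro hle
        have hcE : c + 1 ≤ E := by linarith
        rw [if_pos ⟨by omega, by omega⟩]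
        linarith
      · intro hlt'
        split_ifs at hlt' with hcov
        · linarith [hcov.2]
        · exfalso; linarith
    · have hF2 : F % 2 = 1 := by rw [hr2] at hpar; rw [heq] at hpar; simpa using hpar.symm
      simp only [hr2, hF2, if_neg (by decide : ¬ (1:Nat) = 0), if_neg (by decide : ¬ (1:Int) = 0)]
      constructor
      · intro hle
        have hcE : w - E ≤ c := by linarith
        rw [if_pos ⟨by omega, by omega⟩]
        linarith
      · intro hlt'
        split_ifs at hlt' with hcov
        · linarith [hcov.2]
        · exfalso; linarith
  · have h1 : (F + 1) * w ≤ (r : Int) * w :=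
      mul_le_mul_of_nonneg_right (by linarith) (by linarith)
    have hexpF : (F + 1) * w = F * w + w := by ring
    constructor
    · intro hle; exfalso; split_ifs at hle <;> linarith
    · intro hlt'; exfalso; split_ifs at hlt' <;> linarith

lemma valAt_inj (w : Int) (r r' : Nat) (c c' : Int) (hw : 1 ≤ w)
    (hc0 : 0 ≤ c) (hcw : c < w) (hc0' : 0 ≤ c') (hcw' : c' < w)
    (h : valAt w r c = valAt w r' c') : r = r' ∧ c = c' := by
  obtain ⟨hlo, hhi⟩ := valAt_bounds w r c hc0 hcw
  obtain ⟨hlo', hhi'⟩ := valAt_bounds w r' c' hc0' hcw'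
  have hrr : r = r' := by
    by_contra hne
    rcases Nat.lt_or_ge r r' with hlt | hge
    · have h1 : ((r : Int) + 1) * w ≤ (r' : Int) * w :=
        mul_le_mul_of_nonneg_right (by exact_mod_cast hlt) (by linarith)
      linarith
    · have hlt : r' < r := by omega
      have h1 : ((r' : Int) + 1) * w ≤ (r : Int) * w :=
        mul_le_mul_of_nonneg_right (by exact_mod_cast hlt) (by linarith)
      linarith
  subst hrr
  refine ⟨rfl, ?_⟩
  unfold valAt at h
  split_ifs at h <;> linarith

lemma valAt_self (w num : Int) (hw : 1 ≤ w) (hnum : 1 ≤ num) :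
    valAt w ((num - 1) / w).toNat
      (if ((num - 1) / w) % 2 = 0 then (num - 1) % w else w - 1 - (num - 1) % w) = num := by
  have hw0 : 0 < w := by omega
  have hdiv : w * ((num - 1) / w) + (num - 1) % w = num - 1 := Int.ediv_add_emod (num - 1) w
  have hq0 : 0 ≤ (num - 1) / w := Int.ediv_nonneg (by omega) (by omega)
  have hE0 : 0 ≤ (num - 1) % w := Int.emod_nonneg (num - 1) (by omega)
  have hEw : (num - 1) % w < w := Int.emod_lt_of_pos (num - 1) hw0
  have hcast : ((((num - 1) / w).toNat : Int)) = (num - 1) / w := Int.toNat_of_nonneg hq0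
  have hpar : (((((num - 1) / w).toNat % 2 : Nat)) : Int) = ((num - 1) / w) % 2 := by
    rw [Int.natCast_mod, hcast]; rfl
  unfold valAt
  generalize hQ : (num - 1) / w = Q at hdiv hq0 hcast hpar ⊢
  generalize hE : (num - 1) % w = E at hdiv hE0 hEw ⊢
  have hcm : Q * w = w * Q := mul_comm Q w
  rcases Nat.mod_two_eq_zero_or_one (Q.toNat) with hr2 | hr2
  · have hF2 : Q % 2 = 0 := by rw [hr2] at hpar; simpa using hpar.symm
    rw [if_pos hr2, if_pos hF2, hcast]
    linarith
  · have hF2 : Q % 2 = 1 := by rw [hr2] at hpar; simpa using hpar.symm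
    rw [if_neg (by omega), if_neg (by omega), hcast]
    linarith

lemma colLenI_nonneg (n w c : Int) (hw : 1 ≤ w) (hn : 0 ≤ n) : 0 ≤ colLenI n w c := by
  have h1 : 0 ≤ n / w := Int.ediv_nonneg hn (by omega)
  unfold colLenI; split_ifs <;> omega

lemma getElem!_modify_append (boxes : List (List Int)) (a : Int) (x : Int)
    (c : Nat) (hc : c < boxes.length) (ha : 0 ≤ a) :
    (boxes.modify a.toNat (fun b => b ++ [x]))[c]! =
      if (c : Int) = a then boxes[c]! ++ [x] else boxes[c]! := by
  have hc' : c < (boxes.modify a.toNat (fun b => b ++ [x])).length := by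
    rw [List.length_modify]; exact hc
  have e1 : (boxes.modify a.toNat (fun b => b ++ [x]))[c]!
      = (boxes.modify a.toNat (fun b => b ++ [x]))[c]'hc' := getElem!_pos _ c hc'
  have e2 : boxes[c]! = boxes[c]'hc := getElem!_pos boxes c hc
  rw [e1, e2, List.getElem_modify]
  by_cases h : a.toNat = c
  · rw [if_pos h, if_pos (by omega)]
  · rw [if_neg h, if_neg (by omega)]

lemma solutInner_fwd (n w : Int) :
    ∀ (t : Nat) (a : Int) (boxes : List (List Int)) (number : Int),
      (w - a).toNat = t → 0 ≤ a → a ≤ w → number ≤ n →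
      (solutInner n (PySem.List.pyRange a w 1) boxes number).2
          = number + min (w - a) (n - number + 1) ∧
      (solutInner n (PySem.List.pyRange a w 1) boxes number).1.length = boxes.length ∧
      ∀ (c : Nat), c < boxes.length →
        (solutInner n (PySem.List.pyRange a w 1) boxes number).1[c]!
          = if a ≤ (c : Int) ∧ (c : Int) < a + min (w - a) (n - number + 1)
            then boxes[c]! ++ [number + ((c : Int) - a)] else boxes[c]! := by
  intro t
  induction t with
  | zero =>
    intro a boxes number ht h0 haw hnum
    rw [PySem.List.pyRange_one_eq_nil (by omega)]
    have hmin : min (w - a) (n - number + 1) = 0 := by omega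
    rw [hmin]
    refine ⟨by simp [solutInner], by simp [solutInner], ?_⟩
    intro c hc
    simp only [solutInner]
    rw [if_neg (by omega)]
  | succ m ih =>
    intro a boxes number ht h0 haw hnum
    have haw' : a < w := by omega
    rw [PySem.List.pyRange_one_cons haw']
    simp only [solutInner]
    by_cases hbr : number + 1 > n
    · rw [if_pos hbr]
      have hmin : min (w - a) (n - number + 1) = 1 := by omega
      rw [hmin]
      refine ⟨rfl, List.length_modify .., ?_⟩
      intro c hc
      rw [getElem!_modify_append boxes a number c hc h0]
      by_cases hca : (c : Int) = a
      · rw [if_pos hca, if_pos (by omega)]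
        have hz : number + ((c : Int) - a) = number := by omega
        rw [hz]
      · rw [if_neg hca, if_neg (by omega)]
    · rw [if_neg hbr]
      push_neg at hbr
      obtain ⟨ih2, ihlen, ihget⟩ := ih (a + 1) (boxes.modify a.toNat (fun b => b ++ [number]))
        (number + 1) (by omega) (by omega) (by omega) (by omega)
      have hmin : min (w - a) (n - number + 1)
          = min (w - (a + 1)) (n - (number + 1) + 1) + 1 := by omega
      refine ⟨by rw [ih2, hmin]; ring, by rw [ihlen, List.length_modify], ?_⟩
      intro c hc
      have hc' : c < (boxes.modify a.toNat (fun b => b ++ [number])).length := by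
        rw [List.length_modify]; exact hc
      rw [ihget c hc', getElem!_modify_append boxes a number c hc h0, hmin]
      set M := min (w - (a + 1)) (n - (number + 1) + 1) with hM
      have hM0 : 0 ≤ M := by omega
      by_cases hca : (c : Int) = a
      · rw [if_neg (by omega), if_pos hca, if_pos (by omega)]
        have hz : number + ((c : Int) - a) = number := by omega
        rw [hz]
      · rw [if_neg hca]
        by_cases hin : a + 1 ≤ (c : Int) ∧ (c : Int) < a + 1 + M
        · rw [if_pos hin, if_pos (by omega)]
          have hz : number + 1 + ((c : Int) - (a + 1)) = number + ((c : Int) - a) := by ring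
          rw [hz]
        · rw [if_neg hin, if_neg (by omega)]

lemma solutInner_bwd (n w : Int) :
    ∀ (t : Nat) (a : Int) (boxes : List (List Int)) (number : Int),
      (a + 1).toNat = t → -1 ≤ a → a < w → number ≤ n →
      (solutInner n (PySem.List.pyRange a (-1) (-1)) boxes number).2
          = number + min (a + 1) (n - number + 1) ∧
      (solutInner n (PySem.List.pyRange a (-1) (-1)) boxes number).1.length = boxes.length ∧
      ∀ (c : Nat), c < boxes.length →
        (solutInner n (PySem.List.pyRange a (-1) (-1)) boxes number).1[c]!
          = if a - min (a + 1) (n - number + 1) < (c : Int) ∧ (c : Int) ≤ a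
            then boxes[c]! ++ [number + (a - (c : Int))] else boxes[c]! := by
  intro t
  induction t with
  | zero =>
    intro a boxes number ht h0 haw hnum
    rw [PySem.List.pyRange_neg_one_eq_nil (by omega)]
    have hmin : min (a + 1) (n - number + 1) = 0 := by omega
    rw [hmin]
    refine ⟨by simp [solutInner], by simp [solutInner], ?_⟩
    intro c hc
    simp only [solutInner]
    rw [if_neg (by omega)]
  | succ m ih =>
    intro a boxes number ht h0 haw hnum
    have ha0 : 0 ≤ a := by omega
    rw [PySem.List.pyRange_neg_one_cons (by omega)]
    simp only [solutInner]
    by_cases hbr : number + 1 > n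
    · rw [if_pos hbr]
      have hmin : min (a + 1) (n - number + 1) = 1 := by omega
      rw [hmin]
      refine ⟨rfl, List.length_modify .., ?_⟩
      intro c hc
      rw [getElem!_modify_append boxes a number c hc ha0]
      by_cases hca : (c : Int) = a
      · rw [if_pos hca, if_pos (by omega)]
        have hz : number + (a - (c : Int)) = number := by omega
        rw [hz]
      · rw [if_neg hca, if_neg (by omega)]
    · rw [if_neg hbr]
      push_neg at hbr
      obtain ⟨ih2, ihlen, ihget⟩ := ih (a - 1) (boxes.modify a.toNat (fun b => b ++ [number]))
        (number + 1) (by omega) (by omega) (by omega) (by omega)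
      have hmin : min (a + 1) (n - number + 1)
          = min ((a - 1) + 1) (n - (number + 1) + 1) + 1 := by omega
      refine ⟨by rw [ih2, hmin]; ring, by rw [ihlen, List.length_modify], ?_⟩
      intro c hc
      have hc' : c < (boxes.modify a.toNat (fun b => b ++ [number])).length := by
        rw [List.length_modify]; exact hc
      rw [ihget c hc', getElem!_modify_append boxes a number c hc ha0, hmin]
      set M := min ((a - 1) + 1) (n - (number + 1) + 1) with hM
      have hM0 : 0 ≤ M := by omega
      by_cases hca : (c : Int) = a
      · rw [if_neg (by omega), if_pos hca, if_pos (by omega)]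
        have hz : number + (a - (c : Int)) = number := by omega
        rw [hz]
      · rw [if_neg hca]
        by_cases hin : (a - 1) - M < (c : Int) ∧ (c : Int) ≤ a - 1
        · rw [if_pos hin, if_pos (by omega)]
          have hz : number + 1 + ((a - 1) - (c : Int)) = number + (a - (c : Int)) := by ring
          rw [hz]
        · rw [if_neg hin, if_neg (by omega)]

lemma solutOuter_gt (n w : Int) (f : Nat) (dir : Int) (boxes : List (List Int)) (number : Int)
    (h : n < number) : solutOuter n w f dir boxes number = boxes := by
  cases f <;> simp [solutOuter, show ¬ number ≤ n by omega]

lemma solutOuter_succ (n w : Int) (f : Nat) (dir : Int) (boxes : List (List Int)) (number : Int)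
    (h : number ≤ n) :
    solutOuter n w (f+1) dir boxes number =
      solutOuter n w f (dir * -1)
        (solutInner n (if dir = 1 then PySem.List.pyRange 0 w 1
            else PySem.List.pyRange (w-1) (-1) (-1)) boxes number).1
        (solutInner n (if dir = 1 then PySem.List.pyRange 0 w 1
            else PySem.List.pyRange (w-1) (-1) (-1)) boxes number).2 := by
  simp only [solutOuter, if_pos h]

lemma colFrom_nil (n w : Int) (k : Nat) (c : Int) (h : colLenI n w c ≤ (k : Int)) :
    colFrom n w k c = [] := by
  unfold colFrom colLen
  have h1 : (colLenI n w c).toNat - k = 0 := by omega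
  rw [h1]; rfl

lemma colFrom_cons (n w : Int) (k : Nat) (c : Int) (h : (k : Int) < colLenI n w c) :
    colFrom n w k c = valAt w k c :: colFrom n w (k + 1) c := by
  unfold colFrom colLen
  have h1 : (colLenI n w c).toNat - k = ((colLenI n w c).toNat - (k + 1)) + 1 := by omega
  rw [h1, List.range_succ_eq_map, List.map_cons, List.map_map]
  congr 1
  apply List.map_congr_left
  intro i _
  simp only [Function.comp_apply]
  congr 1
  omega

lemma solutOuter_inv (n w : Int) (hw : 1 ≤ w) (hn : 1 ≤ n) :
    ∀ (fuel : Nat) (k : Nat) (boxes : List (List Int)),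
      boxes.length = w.toNat →
      n ≤ ((fuel : Int) + (k : Int)) * w →
      (solutOuter n w fuel (if k % 2 = 0 then 1 else -1) boxes ((k : Int) * w + 1)).length
          = boxes.length ∧
      ∀ (c : Nat), c < boxes.length →
        (solutOuter n w fuel (if k % 2 = 0 then 1 else -1) boxes ((k : Int) * w + 1))[c]!
          = boxes[c]! ++ colFrom n w k c := by
  intro fuel
  induction fuel with
  | zero =>
    intro k boxes hlen hbound
    refine ⟨rfl, ?_⟩
    intro c hc
    have hc0 : (0:Int) ≤ (c:Int) := Int.natCast_nonneg c
    have hcw : (c:Int) < w := by omega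
    have hnk : n ≤ (k:Int) * w := by
      have he : (((0:Nat):Int) + (k:Int)) * w = (k:Int) * w := by push_cast; ring
      rw [he] at hbound; exact hbound
    have hcl : colLenI n w (c:Int) ≤ (k:Int) := by
      by_contra hx
      push_neg at hx
      have hle := (valAt_le_iff n w (c:Int) k hw hn hc0 hcw).mpr hx
      have hb := (valAt_bounds w k (c:Int) hc0 hcw).1
      linarith
    show boxes[c]! = boxes[c]! ++ colFrom n w k c
    rw [colFrom_nil n w k _ hcl, List.append_nil]
  | succ f ihf =>
    intro k boxes hlen hbound
    by_cases hstep : (k : Int) * w + 1 ≤ n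
    · rcases Nat.mod_two_eq_zero_or_one k with hk2 | hk2
      · -- even row: left-to-right
        rw [if_pos hk2, solutOuter_succ n w f 1 boxes ((k : Int) * w + 1) hstep,
          if_pos (show (1:Int) = 1 from rfl)]
        obtain ⟨hi2, hilen, higet⟩ := solutInner_fwd n w (w - 0).toNat 0 boxes
          ((k:Int)*w + 1) rfl le_rfl (by omega) hstep
        by_cases hfull : (k:Int)*w + w ≤ n
        · -- full row
          have hm : min (w - 0) (n - ((k:Int)*w + 1) + 1) = w := by
            rw [show w - 0 = w from sub_zero w,
              show n - ((k:Int)*w + 1) + 1 = n - (k:Int)*w by ring]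
            exact min_eq_left (by linarith)
          have h2' : (solutInner n (PySem.List.pyRange 0 w 1) boxes ((k:Int)*w + 1)).2
              = (((k+1:Nat)):Int) * w + 1 := by rw [hi2, hm]; push_cast; ring
          have hdir : (1:Int) * -1 = (if (k+1) % 2 = 0 then (1:Int) else -1) := by
            rw [if_neg (by omega)]; norm_num
          rw [h2', hdir]
          obtain ⟨ihl2, ihg2⟩ := ihf (k+1)
            (solutInner n (PySem.List.pyRange 0 w 1) boxes ((k:Int)*w + 1)).1
            (by rw [hilen, hlen])
            (by have he : ((f:Int) + (((k+1:Nat)):Int)) * w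
                  = ((((f+1:Nat)):Int) + (k:Int)) * w := by push_cast; ring
                rw [he]; exact hbound)
          refine ⟨by rw [ihl2, hilen], ?_⟩
          intro c hc
          have hcp : c < (solutInner n (PySem.List.pyRange 0 w 1) boxes ((k:Int)*w + 1)).1.length := by
            rw [hilen]; exact hc
          rw [ihg2 c hcp, higet c hc, hm]
          have hc0 : (0:Int) ≤ (c:Int) := Int.natCast_nonneg c
          have hcw : (c:Int) < w := by omega
          rw [if_pos ⟨hc0, by linarith⟩]
          have hveq : (k:Int)*w + 1 + ((c:Int) - 0) = valAt w k (c:Int) := by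
            unfold valAt; rw [if_pos hk2]; ring
          have hklt : (k:Int) < colLenI n w (c:Int) := by
            apply (valAt_le_iff n w (c:Int) k hw hn hc0 hcw).mp
            have hb := (valAt_bounds w k (c:Int) hc0 hcw).2
            have he : ((k:Int) + 1) * w = (k:Int)*w + w := by ring
            linarith
          rw [hveq, colFrom_cons n w k _ hklt]
          simp
        · -- partial (last) row
          have hm : min (w - 0) (n - ((k:Int)*w + 1) + 1) = n - (k:Int)*w := by
            rw [show w - 0 = w from sub_zero w,
              show n - ((k:Int)*w + 1) + 1 = n - (k:Int)*w by ring]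
            exact min_eq_right (by linarith)
          have h2' : (solutInner n (PySem.List.pyRange 0 w 1) boxes ((k:Int)*w + 1)).2
              = n + 1 := by rw [hi2, hm]; ring
          rw [h2', solutOuter_gt n w f _ _ _ (by linarith)]
          refine ⟨hilen, ?_⟩
          intro c hc
          rw [higet c hc, hm]
          have hc0 : (0:Int) ≤ (c:Int) := Int.natCast_nonneg c
          have hcw : (c:Int) < w := by omega
          have hv : valAt w k (c:Int) = (k:Int)*w + (c:Int) + 1 := by
            unfold valAt; rw [if_pos hk2]
          have hcl1 : colLenI n w (c:Int) ≤ (k:Int) + 1 := by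
            by_contra hx
            push_neg at hx
            have hle := (valAt_le_iff n w (c:Int) (k+1) hw hn hc0 hcw).mpr (by push_cast; linarith)
            have hb := (valAt_bounds w (k+1) (c:Int) hc0 hcw).1
            have he : (((k+1:Nat)):Int) * w = (k:Int)*w + w := by push_cast; ring
            linarith
          by_cases hcov : (0:Int) ≤ (c:Int) ∧ (c:Int) < 0 + (n - (k:Int)*w)
          · rw [if_pos hcov]
            have hklt : (k:Int) < colLenI n w (c:Int) := by
              apply (valAt_le_iff n w (c:Int) k hw hn hc0 hcw).mp
              rw [hv]; linarith [hcov.2]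
            have hveq : (k:Int)*w + 1 + ((c:Int) - 0) = valAt w k (c:Int) := by
              rw [hv]; ring
            rw [hveq, colFrom_cons n w k _ hklt,
              colFrom_nil n w (k+1) _ (by push_cast; linarith)]
          · rw [if_neg hcov]
            have hcl0 : colLenI n w (c:Int) ≤ (k:Int) := by
              by_contra hx
              push_neg at hx
              have hle := (valAt_le_iff n w (c:Int) k hw hn hc0 hcw).mpr hx
              rw [hv] at hle
              exact hcov ⟨hc0, by linarith⟩
            rw [colFrom_nil n w k _ hcl0, List.append_nil]
      · -- odd row: right-to-left
        rw [if_neg (by omega), solutOuter_succ n w f (-1) boxes ((k : Int) * w + 1) hstep,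
          if_neg (show ¬((-1:Int) = 1) by decide)]
        obtain ⟨hi2, hilen, higet⟩ := solutInner_bwd n w ((w-1) + 1).toNat (w-1) boxes
          ((k:Int)*w + 1) rfl (by omega) (by omega) hstep
        by_cases hfull : (k:Int)*w + w ≤ n
        · -- full row
          have hm : min ((w-1) + 1) (n - ((k:Int)*w + 1) + 1) = w := by
            rw [show (w-1) + 1 = w by ring,
              show n - ((k:Int)*w + 1) + 1 = n - (k:Int)*w by ring]
            exact min_eq_left (by linarith)
          have h2' : (solutInner n (PySem.List.pyRange (w-1) (-1) (-1)) boxes ((k:Int)*w + 1)).2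
              = (((k+1:Nat)):Int) * w + 1 := by rw [hi2, hm]; push_cast; ring
          have hdir : (-1:Int) * -1 = (if (k+1) % 2 = 0 then (1:Int) else -1) := by
            rw [if_pos (by omega)]; norm_num
          rw [h2', hdir]
          obtain ⟨ihl2, ihg2⟩ := ihf (k+1)
            (solutInner n (PySem.List.pyRange (w-1) (-1) (-1)) boxes ((k:Int)*w + 1)).1
            (by rw [hilen, hlen])
            (by have he : ((f:Int) + (((k+1:Nat)):Int)) * w
                  = ((((f+1:Nat)):Int) + (k:Int)) * w := by push_cast; ring
                rw [he]; exact hbound)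
          refine ⟨by rw [ihl2, hilen], ?_⟩
          intro c hc
          have hcp : c < (solutInner n (PySem.List.pyRange (w-1) (-1) (-1)) boxes ((k:Int)*w + 1)).1.length := by
            rw [hilen]; exact hc
          rw [ihg2 c hcp, higet c hc, hm]
          have hc0 : (0:Int) ≤ (c:Int) := Int.natCast_nonneg c
          have hcw : (c:Int) < w := by omega
          rw [if_pos ⟨by linarith, by linarith⟩]
          have hveq : (k:Int)*w + 1 + ((w-1) - (c:Int)) = valAt w k (c:Int) := by
            unfold valAt; rw [if_neg (by omega)]; ring
          have hklt : (k:Int) < colLenI n w (c:Int) := by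
            apply (valAt_le_iff n w (c:Int) k hw hn hc0 hcw).mp
            have hb := (valAt_bounds w k (c:Int) hc0 hcw).2
            have he : ((k:Int) + 1) * w = (k:Int)*w + w := by ring
            linarith
          rw [hveq, colFrom_cons n w k _ hklt]
          simp
        · -- partial (last) row
          have hm : min ((w-1) + 1) (n - ((k:Int)*w + 1) + 1) = n - (k:Int)*w := by
            rw [show (w-1) + 1 = w by ring,
              show n - ((k:Int)*w + 1) + 1 = n - (k:Int)*w by ring]
            exact min_eq_right (by linarith)
          have h2' : (solutInner n (PySem.List.pyRange (w-1) (-1) (-1)) boxes ((k:Int)*w + 1)).2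
              = n + 1 := by rw [hi2, hm]; ring
          rw [h2', solutOuter_gt n w f _ _ _ (by linarith)]
          refine ⟨hilen, ?_⟩
          intro c hc
          rw [higet c hc, hm]
          have hc0 : (0:Int) ≤ (c:Int) := Int.natCast_nonneg c
          have hcw : (c:Int) < w := by omega
          have hv : valAt w k (c:Int) = ((k:Int) + 1)*w - (c:Int) := by
            unfold valAt; rw [if_neg (by omega)]
          have he1 : ((k:Int) + 1) * w = (k:Int)*w + w := by ring
          have hcl1 : colLenI n w (c:Int) ≤ (k:Int) + 1 := by
            by_contra hx
            push_neg at hx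
            have hle := (valAt_le_iff n w (c:Int) (k+1) hw hn hc0 hcw).mpr (by push_cast; linarith)
            have hb := (valAt_bounds w (k+1) (c:Int) hc0 hcw).1
            have he : (((k+1:Nat)):Int) * w = (k:Int)*w + w := by push_cast; ring
            linarith
          by_cases hcov : (w-1) - (n - (k:Int)*w) < (c:Int) ∧ (c:Int) ≤ w - 1
          · rw [if_pos hcov]
            have hklt : (k:Int) < colLenI n w (c:Int) := by
              apply (valAt_le_iff n w (c:Int) k hw hn hc0 hcw).mp
              rw [hv]; linarith [hcov.1]
            have hveq : (k:Int)*w + 1 + ((w-1) - (c:Int)) = valAt w k (c:Int) := by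
              rw [hv]; ring
            rw [hveq, colFrom_cons n w k _ hklt,
              colFrom_nil n w (k+1) _ (by push_cast; linarith)]
          · rw [if_neg hcov]
            have hcl0 : colLenI n w (c:Int) ≤ (k:Int) := by
              by_contra hx
              push_neg at hx
              have hle := (valAt_le_iff n w (c:Int) k hw hn hc0 hcw).mpr hx
              rw [hv] at hle
              exact hcov ⟨by linarith, by linarith⟩
            rw [colFrom_nil n w k _ hcl0, List.append_nil]
    · -- loop exits immediately
      have hres : solutOuter n w (f+1) (if k % 2 = 0 then 1 else -1) boxes ((k : Int) * w + 1)
          = boxes := by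
        simp only [solutOuter, if_neg hstep]
      rw [hres]
      refine ⟨rfl, ?_⟩
      intro c hc
      have hc0 : (0:Int) ≤ (c:Int) := Int.natCast_nonneg c
      have hcw : (c:Int) < w := by omega
      have hcl : colLenI n w (c:Int) ≤ (k:Int) := by
        by_contra hx
        push_neg at hx
        have hle := (valAt_le_iff n w (c:Int) k hw hn hc0 hcw).mpr hx
        have hb := (valAt_bounds w k (c:Int) hc0 hcw).1
        linarith
      rw [colFrom_nil n w k _ hcl, List.append_nil]

lemma solutScan_append (num : Int) (xs ys : List (List Int))
    (h : ∀ box ∈ xs, box.contains num = false) :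
    solutScan num (xs ++ ys) = solutScan num ys := by
  induction xs with
  | nil => simp
  | cons b bs ih =>
    simp only [List.cons_append, solutScan, h b (by simp)]
    exact ih (fun box hb => h box (by simp [hb]))

lemma solutScan_all_none (num : Int) (bs : List (List Int))
    (h : ∀ box ∈ bs, box.contains num = false) : solutScan num bs = 0 := by
  have := solutScan_append num bs [] h
  simpa [solutScan] using this

lemma range_decomp (W q : Nat) (hq : q < W) :
    List.range W = List.range q ++ q :: List.range' (q + 1) (W - q - 1) := by
  rw [List.range_eq_range', List.range_eq_range']
  have h2 : List.range' 0 q ++ List.range' q (W - q) = List.range' 0 W := by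
    have := List.range'_append (s := 0) (m := q) (n := W - q) (step := 1)
    simpa [Nat.add_sub_cancel' (Nat.le_of_lt hq)] using this
  rw [← h2]
  congr 1
  have h3 : W - q = (W - q - 1) + 1 := by omega
  conv_lhs => rw [h3]
  rw [List.range'_succ]

lemma index?_map_range (f : Nat → Int) (h q : Nat) (v : Int) (hq : q < h) (hv : f q = v)
    (hne : ∀ r, r < q → f r ≠ v) :
    PySem.List.index? ((List.range h).map f) v = some q := by
  subst hv
  rw [PySem.List.index?_eq_some_iff]
  refine ⟨(List.range q).map f, (List.range' (q + 1) (h - q - 1)).map f, ?_, by simp, ?_⟩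
  · rw [← List.map_cons, ← List.map_append]
    congr 1
    exact range_decomp h q hq
  · intro hmem
    simp only [List.mem_map, List.mem_range] at hmem
    obtain ⟨r, hr, hfr⟩ := hmem
    exact hne r hr hfr

lemma colFrom_zero (n w c : Int) :
    colFrom n w 0 c = (List.range (colLen n w c)).map (fun i => valAt w i c) := by
  unfold colFrom
  rw [Nat.sub_zero]
  apply List.map_congr_left
  intro i _
  rw [Nat.zero_add]

lemma solut_table (n w : Int) (hw : 1 ≤ w) (hn : 1 ≤ n) :
    solutOuter n w (n.toNat + 1) 1 (List.replicate w.toNat []) 1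
      = (List.range w.toNat).map
          (fun (c : Nat) => (List.range (colLen n w (c : Int))).map (fun i => valAt w i (c : Int))) := by
  obtain ⟨hLlen, hLget⟩ := solutOuter_inv n w hw hn (n.toNat + 1) 0 (List.replicate w.toNat [])
    (by simp)
    (by push_cast
        rw [Int.toNat_of_nonneg (by omega)]
        nlinarith)
  have hdir : (if (0:Nat) % 2 = 0 then (1:Int) else -1) = 1 := rfl
  have hnum1 : (((0:Nat)) : Int) * w + 1 = 1 := by push_cast; ring
  rw [hdir, hnum1] at hLlen hLget
  apply List.ext_getElem
  · rw [hLlen]; simp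
  · intro c hc1 hc2
    have hcW : c < w.toNat := by simpa using hc2
    have hcr : c < (List.replicate w.toNat ([] : List Int)).length := by simpa using hcW
    have e1 := hLget c hcr
    rw [getElem!_pos _ c (by rw [hLlen]; simpa using hcW),
      getElem!_pos _ c hcr] at e1
    rw [e1]
    simp [colFrom_zero]

theorem solut_eq_alt (n w num : Int) (h : 1 ≤ w ∨ n ≤ 0) : solut n w num = solut_alt n w num := by
  by_cases hn : n ≤ 0
  · unfold solut
    rw [solutOuter_gt n w _ _ _ _ (by omega)]
    rw [solutScan_all_none num _ (by
      intro box hb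
      rw [List.eq_of_mem_replicate hb]; rfl)]
    unfold solut_alt
    rw [if_pos (by omega)]
  · have hn1 : 1 ≤ n := by omega
    have hw : 1 ≤ w := by tauto
    have hw0 : 0 < w := by omega
    unfold solut
    rw [solut_table n w hw hn1]
    by_cases hnum : 1 ≤ num ∧ num ≤ n
    · -- num is in the grid
      obtain ⟨hnum1, hnum2⟩ := hnum
      set Q : Int := (num - 1) / w with hQdef
      set cB : Int := if Q % 2 = 0 then (num - 1) % w else w - 1 - (num - 1) % w with hcBdef
      have hQ0 : 0 ≤ Q := Int.ediv_nonneg (by omega) (by omega)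
      have hrem0 : 0 ≤ (num - 1) % w := Int.emod_nonneg (num - 1) (by omega)
      have hremw : (num - 1) % w < w := Int.emod_lt_of_pos (num - 1) hw0
      have hcB0 : 0 ≤ cB := by rw [hcBdef]; split_ifs <;> omega
      have hcBw : cB < w := by rw [hcBdef]; split_ifs <;> omega
      have hval : valAt w Q.toNat cB = num := valAt_self w num hw hnum1
      have hQlt : ((Q.toNat : Nat) : Int) < colLenI n w cB :=
        (valAt_le_iff n w cB Q.toNat hw hn1 hcB0 hcBw).mp (by rw [hval]; exact hnum2)
      set cBN : Nat := cB.toNat with hcBNdef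
      have hcBcast : ((cBN : Nat) : Int) = cB := Int.toNat_of_nonneg hcB0
      have hcBN : cBN < w.toNat := by omega
      -- columns before cB do not contain num
      have hnotmem : ∀ (c : Nat), c < w.toNat → (c : Int) ≠ cB →
          ((List.range (colLen n w (c : Int))).map (fun i => valAt w i (c : Int))).contains num
            = false := by
        intro c hc hne
        rw [List.contains_eq_mem, decide_eq_false_iff_not]
        intro hmem
        simp only [List.mem_map, List.mem_range] at hmem
        obtain ⟨i, hi, hieq⟩ := hmem
        have := valAt_inj w i Q.toNat (c : Int) cB hw (by positivity) (by omega) hcB0 hcBw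
          (by rw [hieq, hval])
        exact hne this.2
      rw [range_decomp w.toNat cBN hcBN, List.map_append, List.map_cons]
      rw [solutScan_append num _ _ (by
        intro box hb
        simp only [List.mem_map, List.mem_range] at hb
        obtain ⟨c, hcq, rfl⟩ := hb
        exact hnotmem c (by omega) (by omega))]
      have hmemB : num ∈ (List.range (colLen n w cB)).map (fun i => valAt w i cB) := by
        simp only [List.mem_map, List.mem_range]
        exact ⟨Q.toNat, by unfold colLen; omega, hval⟩
      have hidx : PySem.List.index? ((List.range (colLen n w cB)).map
          (fun i => valAt w i cB)) num = some Q.toNat := by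
        apply index?_map_range (fun i => valAt w i cB) (colLen n w cB) Q.toNat num
          (by unfold colLen; omega) hval
        intro r hr hcon
        have := valAt_inj w r Q.toNat cB cB hw hcB0 hcBw hcB0 hcBw (by rw [hcon, hval])
        omega
      simp only [solutScan]
      rw [hcBcast]
      rw [if_pos (by rw [List.contains_eq_mem]; exact decide_eq_true hmemB), hidx]
      simp only [Option.getD_some, List.length_map, List.length_range]
      -- now the closed form on the B side
      have hcl0 : 0 ≤ colLenI n w cB := colLenI_nonneg n w cB hw (by omega)
      have hA : (colLen n w cB : Int) - (Q.toNat : Int) = colLenI n w cB - Q := by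
        unfold colLen; omega
      rw [hA]
      unfold solut_alt
      rw [if_neg (by omega)]
      simp only [PySem.Int.floordiv_eq_ediv_of_pos hw0, PySem.Int.mod_eq_emod_of_pos hw0,
        PySem.Int.floordiv_eq_ediv_of_pos (show (0:Int) < 2 by norm_num),
        PySem.Int.mod_eq_emod_of_pos (show (0:Int) < 2 by norm_num)]
      unfold colLenI
      rw [← hQdef, ← hcBdef]
      have hbool : ((if (n / w) % 2 = 0 then decide (cB < n % w) else decide (w - n % w ≤ cB)) = true)
          ↔ (if (n / w) % 2 = 0 then cB < n % w else w - n % w ≤ cB) := by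
        split_ifs <;> simp
      simp only [hbool]
      congr 1
      by_cases hA1 : n % w ≠ 0
      · by_cases hA2 : (if (n / w) % 2 = 0 then cB < n % w else w - n % w ≤ cB)
        · rw [if_pos ⟨hA1, hA2⟩, if_pos hA1, if_pos hA2]
        · rw [if_neg (by tauto), if_pos hA1, if_neg hA2]
      · rw [if_neg (by tauto), if_neg hA1]
    · -- num is not in the grid: every stored value is in [1, n]
      rw [solutScan_all_none num _ (by
        intro box hb
        simp only [List.mem_map, List.mem_range] at hb
        obtain ⟨c, hcq, rfl⟩ := hb
        rw [List.contains_eq_mem, decide_eq_false_iff_not]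
        intro hmem
        simp only [List.mem_map, List.mem_range] at hmem
        obtain ⟨i, hi, hieq⟩ := hmem
        have hc0 : (0:Int) ≤ (c:Int) := Int.natCast_nonneg c
        have hcw : (c:Int) < w := by omega
        have hb1 := (valAt_bounds w i (c:Int) hc0 hcw).1
        have hb2 := (valAt_le_iff n w (c:Int) i hw hn1 hc0 hcw).mpr (by unfold colLen at hi; omega)
        have hiw : 0 ≤ (i:Int) * w := mul_nonneg (Int.natCast_nonneg i) (by omega)
        rw [hieq] at hb1 hb2
        exact hnum ⟨by linarith, by linarith⟩)]
      unfold solut_alt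
      rw [if_pos (by omega)]

-- ===== VERDICT (by name: the statement is the Claim_ definition above) =====
theorem solut_spec : Claim_equal_solut := by
  intro n w num _ hpre
  unfold Spec_solut
  exact solut_eq_alt n w num hpre
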